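-- pv_equiv track=rewrite | github.com/abdulshameed-lang/query-tuner-tool- | backend/app/core/analysis/plan_comparator.py | _determine_overall_severity
-- ===== SOURCE A (Python) =====
-- from typing import List, Dict, Any, Optional, Tuple, Set
--
-- def _determine_overall_severity(
--     regressions: List[Dict[str, Any]]
-- ) -> str:
--     """
--     Determine overall severity from list of regressions.
--
--     Args:
--         regressions: List of regression findings
--
--     Returns:
--         Overall severity level
--     """
--     if not regressions:
--         return "none"
--
--     severities = [r.get("severity", "low") for r in regressions]
--
--     if "high" in severities:
--         return "high"
--     elif "medium" in severities:
--         return "medium"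
--     else:
--         return "low"
-- ===== SOURCE B (Python) =====
-- def _determine_overall_severity(regressions):
--     if not regressions:
--         return "none"
--     rank = {"high": 3, "medium": 2}
--     m = 1
--     for r in regressions:
--         m = max(m, rank.get(r.get("severity", "low"), 1))
--     return "high" if m == 3 else ("medium" if m == 2 else "low")
-- ===== Notes on version B (the rewrite author's own statement) =====
-- stated objective: simpler
-- what changed: Replaces building a severities list plus two ordered membership scans with a single pass maintaining a running maximum severity rank, translated back to a label at the end.
import Mathlib
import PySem

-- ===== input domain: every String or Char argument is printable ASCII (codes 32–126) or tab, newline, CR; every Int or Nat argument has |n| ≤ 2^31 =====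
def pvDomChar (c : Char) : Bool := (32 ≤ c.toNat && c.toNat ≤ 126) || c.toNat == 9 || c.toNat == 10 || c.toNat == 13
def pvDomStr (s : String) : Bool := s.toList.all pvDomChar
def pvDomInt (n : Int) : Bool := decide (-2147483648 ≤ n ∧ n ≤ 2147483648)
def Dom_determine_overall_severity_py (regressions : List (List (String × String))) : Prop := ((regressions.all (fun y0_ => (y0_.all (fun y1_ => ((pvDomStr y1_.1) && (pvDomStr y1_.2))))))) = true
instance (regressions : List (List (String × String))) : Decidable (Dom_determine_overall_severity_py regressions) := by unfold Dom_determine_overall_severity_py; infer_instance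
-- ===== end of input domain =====

-- B replaces A's severities list and two ordered membership scans with a single pass
-- keeping a running maximum severity rank (objective: simpler).

-- ===== PORT A =====
-- r.get("severity", "low") (first-match association-list lookup)
def pvSev (r : List (String × String)) : String := (PySem.Dict.mk r).getD "severity" "low"

def determine_overall_severity_py (regressions : List (List (String × String))) : String :=
  if regressions = [] then "none"
  else
    let severities := regressions.map pvSev
    if "high" ∈ severities then "high"
    else if "medium" ∈ severities then "medium"
    else "low"

-- ===== PORT B =====
-- the rank dict literal {"high": 3, "medium": 2}
def pvRankDict : PySem.Dict String Int := PySem.Dict.mk [("high", 3), ("medium", 2)]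

def determine_overall_severity_py_alt (regressions : List (List (String × String))) : String :=
  if regressions = [] then "none"
  else
    let m := regressions.foldl (fun m r => max m (pvRankDict.getD (pvSev r) 1)) 1
    if m = 3 then "high" else if m = 2 then "medium" else "low"

-- ===== PRECONDITION & SPEC =====
def Spec_determine_overall_severity_py (regressions : List (List (String × String))) (out : String) : Prop := out = determine_overall_severity_py_alt regressions
instance (regressions : List (List (String × String))) (out : String) : Decidable (Spec_determine_overall_severity_py regressions out) := by unfold Spec_determine_overall_severity_py; infer_instance

-- ===== CLAIM (what is proved, stated in full; the proofs are below) =====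
def Claim_equal_determine_overall_severity_py : Prop := ∀ (regressions : List (List (String × String))), Dom_determine_overall_severity_py regressions → Spec_determine_overall_severity_py regressions (determine_overall_severity_py regressions)

-- ===== LEMMAS AND PROOFS =====

theorem pvRank_eq (s : String) :
    pvRankDict.getD s 1 = (if s = "high" then 3 else if s = "medium" then 2 else 1) := by
  by_cases h1 : s = "high"
  · subst h1; decide
  · by_cases h2 : s = "medium"
    · subst h2; decide
    · have e1 : (("high" : String) == s) = false := beq_eq_false_iff_ne.mpr (Ne.symm h1)
      have e2 : (("medium" : String) == s) = false := beq_eq_false_iff_ne.mpr (Ne.symm h2)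
      simp [pvRankDict, PySem.Dict.getD, PySem.Dict.get?, e1, e2, h1, h2]

theorem pvFold_eq (L : List (List (String × String))) (a : Int) (ha : 1 ≤ a) :
    L.foldl (fun m r => max m (if pvSev r = "high" then 3 else if pvSev r = "medium" then 2 else 1)) a =
      max a (if "high" ∈ L.map pvSev then 3 else if "medium" ∈ L.map pvSev then 2 else 1) := by
  induction L generalizing a with
  | nil =>
    simp only [List.foldl_nil, List.map_nil, List.not_mem_nil, if_false]
    exact (max_eq_left ha).symm
  | cons r L ih =>
    simp only [List.foldl_cons, List.map_cons, List.mem_cons]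
    rw [ih (max a _) (le_trans ha (le_max_left _ _))]
    simp only [show ("high" = pvSev r) ↔ (pvSev r = "high") from eq_comm,
      show ("medium" = pvSev r) ↔ (pvSev r = "medium") from eq_comm]
    rw [max_assoc]
    congr 1
    split_ifs <;> first | decide | tauto

-- ===== VERDICT (by name: the statement is the Claim_ definition above) =====
theorem determine_overall_severity_py_spec : Claim_equal_determine_overall_severity_py := by
  intro regressions _
  show _ = _
  unfold determine_overall_severity_py determine_overall_severity_py_alt
  by_cases hnil : regressions = []
  · simp [hnil]
  · simp only [hnil, if_false]
    rw [show (fun (m : Int) r => max m (pvRankDict.getD (pvSev r) 1)) =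
        (fun (m : Int) r => max m (if pvSev r = "high" then 3 else if pvSev r = "medium" then 2 else 1))
      from funext fun m => funext fun r => by rw [pvRank_eq]]
    rw [pvFold_eq _ 1 (by norm_num)]
    by_cases h1 : "high" ∈ regressions.map pvSev <;>
      by_cases h2 : "medium" ∈ regressions.map pvSev <;>
      simp only [h1, h2, if_true, if_false] <;> rfl
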